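-- pv_equiv track=rewrite | github.com/rudidev08/x4-foundations-version-diff | src/05_assemble.py | split_body_points
-- ===== SOURCE A (Python) =====
-- def split_body_points(body: str) -> list[str]:
--     points: list[str] = []
--     prose: list[str] = []
--     current: list[str] = []
--     saw_bullets = False
--
--     for line in body.splitlines():
--         if line.startswith("- "):
--             saw_bullets = True
--             if prose:
--                 preamble = "\n".join(prose).strip()
--                 if preamble:
--                     points.append(preamble)
--                 prose = []
--             if current:
--                 points.append("\n".join(current).strip())
--             current = [line[2:]]
--             continue
--         if saw_bullets:
--             current.append(line.rstrip())
--         else: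
--             prose.append(line.rstrip())
--
--     if current:
--         points.append("\n".join(current).strip())
--     elif prose:
--         prose_block = "\n".join(prose).strip()
--         if prose_block:
--             points.append(prose_block)
--     return [point for point in points if point]
-- ===== SOURCE B (Python) =====
-- def _split_at_bullet(lines):
--     for i, line in enumerate(lines):
--         if line.startswith("- "):
--             return lines[:i], lines[i:]
--     return lines, []
--
--
-- def _groups(lines):
--     out = []
--     while lines:
--         head, tail = lines[0], lines[1:]
--         cont, lines = _split_at_bullet(tail)
--         out.append("\n".join([head[2:]] + [l.rstrip() for l in cont]).strip())
--     return out
--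
--
-- def split_body_points(body: str) -> list[str]:
--     pre, rest = _split_at_bullet(body.splitlines())
--     preamble = "\n".join(l.rstrip() for l in pre).strip()
--     return [p for p in [preamble] + _groups(rest) if p]
-- ===== Notes on version B (the rewrite author's own statement) =====
-- stated objective: simpler
-- what changed: A's single pass with a four-field mutable state machine (points/prose/current/saw_bullets) is replaced by a recursive decomposition: split the line list at the first bullet, take the preamble as a candidate point, then recursively cut the remainder into bullet groups and map each group to its joined, stripped text.
import Mathlib
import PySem

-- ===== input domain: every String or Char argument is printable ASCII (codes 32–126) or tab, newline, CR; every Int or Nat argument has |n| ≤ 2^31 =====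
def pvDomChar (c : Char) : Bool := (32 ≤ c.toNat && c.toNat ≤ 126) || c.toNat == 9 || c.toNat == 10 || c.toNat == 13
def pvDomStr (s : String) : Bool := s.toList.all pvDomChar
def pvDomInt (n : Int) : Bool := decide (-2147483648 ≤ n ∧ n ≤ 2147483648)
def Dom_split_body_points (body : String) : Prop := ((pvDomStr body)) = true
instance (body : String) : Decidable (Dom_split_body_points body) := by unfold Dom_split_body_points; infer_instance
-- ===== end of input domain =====

-- B replaces A's one-pass four-field state machine by a recursive decomposition
-- (split at the first bullet, then recurse group by group); objective: simpler, not faster.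

-- ===== PORT A =====
-- loop body of A's 'for line in body.splitlines()'
def pvStepA (st : List String × List String × List String × Bool) (line : String) :
    List String × List String × List String × Bool :=
  let (points, prose, current, saw) := st
  if PySem.Str.startswith line "- " then
    let points :=
      if prose ≠ [] then
        let preamble := PySem.Str.strip (PySem.Str.join "\n" prose)
        if preamble ≠ "" then points ++ [preamble] else points
      else points
    let points :=
      if current ≠ [] then points ++ [PySem.Str.strip (PySem.Str.join "\n" current)] else points
    (points, [], [PySem.Str.slice line (some 2) none], true)
  else if saw then (points, prose, current ++ [PySem.Str.rstrip line], saw)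
  else (points, prose ++ [PySem.Str.rstrip line], current, saw)

-- A's code after the loop ('if current: … elif prose: …')
def pvFinalA (st : List String × List String × List String × Bool) : List String :=
  let (points, prose, current, _) := st
  if current ≠ [] then points ++ [PySem.Str.strip (PySem.Str.join "\n" current)]
  else if prose ≠ [] then
    let prose_block := PySem.Str.strip (PySem.Str.join "\n" prose)
    if prose_block ≠ "" then points ++ [prose_block] else points
  else points

def split_body_points (body : String) : List String :=
  (pvFinalA ((PySem.Str.splitlines body).foldl pvStepA ([], [], [], false))).filter
    (fun p => p ≠ "")

-- ===== PORT B =====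
-- B's helper _split_at_bullet: the lines before the first '- ' line, and the rest
def pvSplitAtBullet : List String → List String × List String
  | [] => ([], [])
  | l :: ls =>
    if PySem.Str.startswith l "- " then ([], l :: ls)
    else ((l :: (pvSplitAtBullet ls).1), (pvSplitAtBullet ls).2)

-- termination measure for pvGroups (the port cites it by name)
theorem pvSplitAtBullet_snd_length_le (ls : List String) :
    (pvSplitAtBullet ls).2.length ≤ ls.length := by
  induction ls with
  | nil => simp [pvSplitAtBullet]
  | cons l ls ih =>
    simp only [pvSplitAtBullet]
    split
    · simp
    · simpa using Nat.le_succ_of_le ih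

-- B's helper _groups
def pvGroups : List String → List String
  | [] => []
  | l :: ls =>
    PySem.Str.strip (PySem.Str.join "\n"
        (PySem.Str.slice l (some 2) none :: (pvSplitAtBullet ls).1.map PySem.Str.rstrip)) ::
      pvGroups (pvSplitAtBullet ls).2
termination_by ls => ls.length
decreasing_by exact Nat.lt_succ_of_le (pvSplitAtBullet_snd_length_le ls)

def split_body_points_alt (body : String) : List String :=
  let pr := pvSplitAtBullet (PySem.Str.splitlines body)
  let preamble := PySem.Str.strip (PySem.Str.join "\n" (pr.1.map PySem.Str.rstrip))
  (preamble :: pvGroups pr.2).filter (fun p => p ≠ "")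

-- ===== PRECONDITION & SPEC =====
def Spec_split_body_points (body : String) (out : List String) : Prop := out = split_body_points_alt body
instance (body : String) (out : List String) : Decidable (Spec_split_body_points body out) := by unfold Spec_split_body_points; infer_instance

-- ===== CLAIM (what is proved, stated in full; the proofs are below) =====
def Claim_equal_split_body_points : Prop := ∀ (body : String), Dom_split_body_points body → Spec_split_body_points body (split_body_points body)

-- ===== LEMMAS AND PROOFS =====

-- what A's bullet-mode loop produces from a given current group, as a recursion over the lines
def pvGroupsSpec : List String → List String → List String
  | cur, [] => [PySem.Str.strip (PySem.Str.join "\n" cur)]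
  | cur, l :: ls =>
    if PySem.Str.startswith l "- " then
      PySem.Str.strip (PySem.Str.join "\n" cur) ::
        pvGroupsSpec [PySem.Str.slice l (some 2) none] ls
    else pvGroupsSpec (cur ++ [PySem.Str.rstrip l]) ls

-- phase 2: once a bullet has been seen (prose = [], current ≠ []), A's loop + epilogue
-- appends exactly the groups described by pvGroupsSpec
theorem pvPhase2 (ls : List String) : ∀ (pts cur : List String), cur ≠ [] →
    pvFinalA (ls.foldl pvStepA (pts, [], cur, true)) = pts ++ pvGroupsSpec cur ls := by
  induction ls with
  | nil =>
    intro pts cur hcur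
    simp [pvFinalA, pvGroupsSpec, hcur]
  | cons l ls ih =>
    intro pts cur hcur
    rw [List.foldl_cons]
    by_cases hb : PySem.Str.startswith l "- " = true
    · rw [show pvStepA (pts, [], cur, true) l =
          (pts ++ [PySem.Str.strip (PySem.Str.join "\n" cur)], [],
            [PySem.Str.slice l (some 2) none], true) from by
        simp only [pvStepA, hb, if_true, ne_eq, not_true_eq_false, if_false, if_pos hcur]]
      rw [ih _ _ (by simp)]
      rw [pvGroupsSpec, if_pos hb]
      simp
    · rw [show pvStepA (pts, [], cur, true) l =
          (pts, [], cur ++ [PySem.Str.rstrip l], true) from by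
        simp only [pvStepA, hb, if_false, if_true, Bool.false_eq_true]]
      rw [ih _ _ (by simp [hcur])]
      rw [pvGroupsSpec, if_neg hb]

-- pvGroupsSpec over any suffix equals: finish the open group at the next bullet, then pvGroups
theorem pvGroupsSpec_eq (ls : List String) : ∀ (cur : List String),
    pvGroupsSpec cur ls =
      PySem.Str.strip (PySem.Str.join "\n"
          (cur ++ (pvSplitAtBullet ls).1.map PySem.Str.rstrip)) ::
        pvGroups (pvSplitAtBullet ls).2 := by
  induction ls with
  | nil => intro cur; simp [pvGroupsSpec, pvSplitAtBullet, pvGroups]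
  | cons l ls ih =>
    intro cur
    by_cases hb : PySem.Str.startswith l "- " = true
    · rw [pvGroupsSpec, if_pos hb, ih,
        show pvSplitAtBullet (l :: ls) = ([], l :: ls) from by
          rw [pvSplitAtBullet, if_pos hb],
        pvGroups]
      simp
    · rw [pvGroupsSpec, if_neg hb, ih,
        show pvSplitAtBullet (l :: ls) =
            (l :: (pvSplitAtBullet ls).1, (pvSplitAtBullet ls).2) from by
          rw [pvSplitAtBullet, if_neg hb]]
      simp

-- A's bullet group lists never contain the empty string unless filtered (helper fact):
-- the conditional preamble block A pushes, as a list
def pvPreBlock (prose : List String) : List String :=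
  if prose ≠ [] ∧ PySem.Str.strip (PySem.Str.join "\n" prose) ≠ "" then
    [PySem.Str.strip (PySem.Str.join "\n" prose)]
  else []

-- the groups contributed by the part of the line list from the first bullet on
def pvTail : List String → List String
  | [] => []
  | b :: rs => pvGroupsSpec [PySem.Str.slice b (some 2) none] rs

-- phase 1: from the initial state (accumulated prose pr), A's loop + epilogue
theorem pvPhase1 (ls : List String) : ∀ (pr : List String),
    pvFinalA (ls.foldl pvStepA ([], pr, [], false)) =
      pvPreBlock (pr ++ (pvSplitAtBullet ls).1.map PySem.Str.rstrip) ++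
        pvTail (pvSplitAtBullet ls).2 := by
  induction ls with
  | nil =>
    intro pr
    simp only [pvSplitAtBullet, List.foldl_nil, pvFinalA, pvPreBlock, pvTail]
    by_cases hp : pr = []
    · simp [hp]
    · by_cases hb : PySem.Str.strip (PySem.Str.join "\n" pr) = "" <;> simp [hp, hb]
  | cons l ls ih =>
    intro pr
    rw [List.foldl_cons]
    by_cases hb : PySem.Str.startswith l "- " = true
    · rw [show pvStepA ([], pr, [], false) l =
          ((if pr ≠ [] then
              (if PySem.Str.strip (PySem.Str.join "\n" pr) ≠ "" then
                [PySem.Str.strip (PySem.Str.join "\n" pr)] else [])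
            else []), [], [PySem.Str.slice l (some 2) none], true) from by
        by_cases hp : pr = [] <;>
          by_cases hs : PySem.Str.strip (PySem.Str.join "\n" pr) = "" <;>
          simp only [pvStepA, hb, if_true, ne_eq, hp, hs, not_true_eq_false, if_false,
            not_false_eq_true, List.nil_append, reduceCtorEq] <;> simp [hp, hs]]
      rw [pvPhase2 ls _ _ (by simp)]
      rw [show pvSplitAtBullet (l :: ls) = ([], l :: ls) from by
        rw [pvSplitAtBullet, if_pos hb]]
      unfold pvPreBlock
      by_cases hp : pr = [] <;>
        by_cases hs : PySem.Str.strip (PySem.Str.join "\n" pr) = "" <;>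
        simp [hp, hs, pvTail]
    · rw [show pvStepA ([], pr, [], false) l =
          ([], pr ++ [PySem.Str.rstrip l], [], false) from by
        simp only [pvStepA, hb, if_false, Bool.false_eq_true]]
      rw [ih (pr ++ [PySem.Str.rstrip l])]
      rw [show pvSplitAtBullet (l :: ls) =
          (l :: (pvSplitAtBullet ls).1, (pvSplitAtBullet ls).2) from by
        rw [pvSplitAtBullet, if_neg hb]]
      simp

-- pvPreBlock is exactly the preamble candidate surviving the final empty-filter
theorem pvPreBlock_eq_filter (prose : List String) :
    pvPreBlock prose =
      [PySem.Str.strip (PySem.Str.join "\n" prose)].filter (fun p => p ≠ "") := by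
  unfold pvPreBlock
  by_cases hs : PySem.Str.strip (PySem.Str.join "\n" prose) = ""
  · simp [hs]
  · have hp : prose ≠ [] := by
      intro h
      subst h
      exact hs (by decide)
    simp [hs, hp]

-- ===== VERDICT (by name: the statement is the Claim_ definition above) =====
theorem split_body_points_spec : Claim_equal_split_body_points := by
  intro body _
  unfold Spec_split_body_points split_body_points split_body_points_alt
  rw [pvPhase1 (PySem.Str.splitlines body) []]
  simp only [List.nil_append]
  rcases hsplit : (pvSplitAtBullet (PySem.Str.splitlines body)).2 with _ | ⟨b, rs⟩
  · rw [pvTail, pvPreBlock_eq_filter, pvGroups]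
    simp [List.filter_filter]
  · rw [pvTail, pvGroupsSpec_eq, pvPreBlock_eq_filter, pvGroups]
    simp only [List.filter_filter, List.filter_append, List.singleton_append,
      Bool.and_self]
    rw [← List.filter_append]
    rfl
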